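-- pv_equiv track=rewrite | github.com/timothyfehr-creator/Iran-Simulator | src/ingest/coordinator.py | apply_per_bucket_caps
-- ===== SOURCE A (Python) =====
-- from typing import List, Dict, Any, Optional, Tuple, Set
--
-- def apply_per_bucket_caps(
--     docs: List[Dict[str, Any]],
--     source_config: Dict[str, Dict],
--     max_per_bucket: int = 200
-- ) -> List[Dict[str, Any]]:
--     """
--     Apply per-bucket caps, keeping most recent docs by published_at.
--
--     Args:
--         docs: List of evidence documents
--         source_config: Source configuration mapping
--         max_per_bucket: Maximum docs per bucket
--
--     Returns:
--         Filtered list respecting caps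
--     """
--     # Group docs by bucket
--     bucket_docs: Dict[str, List[Dict[str, Any]]] = {}
--
--     for doc in docs:
--         source_id = doc.get("source_id", "").lower()
--         if source_id.startswith("src_"):
--             source_id = source_id[4:]
--
--         bucket = source_config.get(source_id, {}).get("bucket", "unknown")
--         if bucket not in bucket_docs:
--             bucket_docs[bucket] = []
--         bucket_docs[bucket].append(doc)
--
--     # Sort each bucket by published_at (newest first) and cap
--     capped_docs = []
--     for bucket, bdocs in bucket_docs.items():
--         # Sort by published_at descending
--         sorted_docs = sorted(
--             bdocs,
--             key=lambda d: d.get("published_at_utc", ""),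
--             reverse=True
--         )
--         # Keep only max_per_bucket
--         capped_docs.extend(sorted_docs[:max_per_bucket])
--
--     return capped_docs
-- ===== SOURCE B (Python) =====
-- def apply_per_bucket_caps(docs, source_config, max_per_bucket=200):
--     def bucket_of(doc):
--         sid = doc.get("source_id", "").lower()
--         if sid.startswith("src_"):
--             sid = sid[4:]
--         return source_config.get(sid, {}).get("bucket", "unknown")
--
--     # bucket output order = first appearance in the original docs order
--     order = list(dict.fromkeys(bucket_of(d) for d in docs))
--     # one global stable sort, newest first
--     gsorted = sorted(docs, key=lambda d: d.get("published_at_utc", ""), reverse=True)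
--     out = []
--     for b in order:
--         group = [d for d in gsorted if bucket_of(d) == b]
--         out.extend(group[:max_per_bucket])
--     return out
-- ===== Notes on version B (the rewrite author's own statement) =====
-- stated objective: alternative
-- what changed: A builds a dict of per-bucket lists and sorts each bucket separately; B performs one global stable sort of all docs by published_at_utc descending, then groups the sorted list by bucket (in first-appearance order of buckets) and caps each group.
import Mathlib
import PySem

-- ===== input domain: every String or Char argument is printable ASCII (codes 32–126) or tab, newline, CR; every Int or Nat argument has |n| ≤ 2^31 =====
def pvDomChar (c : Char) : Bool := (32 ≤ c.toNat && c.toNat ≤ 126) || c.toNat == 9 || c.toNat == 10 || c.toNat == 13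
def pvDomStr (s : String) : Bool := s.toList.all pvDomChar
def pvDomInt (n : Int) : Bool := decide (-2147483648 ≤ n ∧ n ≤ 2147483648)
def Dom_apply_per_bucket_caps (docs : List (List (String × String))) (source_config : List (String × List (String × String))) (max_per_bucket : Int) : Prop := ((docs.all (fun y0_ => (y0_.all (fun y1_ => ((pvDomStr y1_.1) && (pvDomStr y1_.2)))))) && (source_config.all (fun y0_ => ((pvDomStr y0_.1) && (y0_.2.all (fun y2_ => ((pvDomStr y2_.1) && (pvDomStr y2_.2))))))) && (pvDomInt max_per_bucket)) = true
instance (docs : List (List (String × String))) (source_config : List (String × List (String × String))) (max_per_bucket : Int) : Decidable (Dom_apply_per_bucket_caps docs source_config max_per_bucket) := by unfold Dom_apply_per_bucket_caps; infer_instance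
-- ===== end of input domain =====

-- B replaces A's per-bucket sorts by ONE global stable sort followed by grouping; same return value, a different decomposition (objective: alternative).

-- ===== PORT A =====
-- shared helper: the bucket of a doc (the same three Python lines occur verbatim in A and in B's bucket_of)
def pvBucketOf (source_config : List (String × List (String × String))) (doc : List (String × String)) : String :=
  let sid0 := PySem.Str.lower ((PySem.Dict.mk doc).getD "source_id" "")
  let sid := if PySem.Str.startswith sid0 "src_" then PySem.Str.slice sid0 (some 4) none else sid0
  (PySem.Dict.mk ((PySem.Dict.mk source_config).getD sid [])).getD "bucket" "unknown"

-- the sort key d.get("published_at_utc", "")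
def pvPubKey (doc : List (String × String)) : String :=
  (PySem.Dict.mk doc).getD "published_at_utc" ""

def apply_per_bucket_caps (docs : List (List (String × String))) (source_config : List (String × List (String × String))) (max_per_bucket : Int) : List (List (String × String)) :=
  -- Group docs by bucket
  let bucket_docs : PySem.Dict String (List (List (String × String))) :=
    docs.foldl (fun bd doc =>
      let bucket := pvBucketOf source_config doc
      let bd := if bd.contains bucket then bd else bd.insert bucket []
      bd.modify bucket [] (fun l => l ++ [doc])) PySem.Dict.empty
  -- Sort each bucket by published_at (newest first) and cap
  bucket_docs.items.foldl (fun capped p =>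
    capped ++ PySem.List.slice (PySem.List.sorted p.2 pvPubKey true) none (some max_per_bucket)) []

-- ===== PORT B =====
def apply_per_bucket_caps_alt (docs : List (List (String × String))) (source_config : List (String × List (String × String))) (max_per_bucket : Int) : List (List (String × String)) :=
  -- bucket output order = first appearance in the original docs order
  let order := PySem.List.dedup (docs.map (fun d => pvBucketOf source_config d))
  -- one global stable sort, newest first
  let gsorted := PySem.List.sorted docs pvPubKey true
  order.foldl (fun out b =>
    out ++ PySem.List.slice (gsorted.filter (fun d => pvBucketOf source_config d == b)) none (some max_per_bucket)) []

-- ===== PRECONDITION & SPEC =====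
def Spec_apply_per_bucket_caps (docs : List (List (String × String))) (source_config : List (String × List (String × String))) (max_per_bucket : Int) (out : List (List (String × String))) : Prop := out = apply_per_bucket_caps_alt docs source_config max_per_bucket
instance (docs : List (List (String × String))) (source_config : List (String × List (String × String))) (max_per_bucket : Int) (out : List (List (String × String))) : Decidable (Spec_apply_per_bucket_caps docs source_config max_per_bucket out) := by unfold Spec_apply_per_bucket_caps; infer_instance

-- ===== CLAIM (what is proved, stated in full; the proofs are below) =====
def Claim_equal_apply_per_bucket_caps : Prop := ∀ (docs : List (List (String × String))) (source_config : List (String × List (String × String))) (max_per_bucket : Int), Dom_apply_per_bucket_caps docs source_config max_per_bucket → Spec_apply_per_bucket_caps docs source_config max_per_bucket (apply_per_bucket_caps docs source_config max_per_bucket)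

-- ===== LEMMAS AND PROOFS =====

-- A's "if bucket not in bd: bd[bucket] = []" followed by append is one modify with default []
theorem pv_mod_step {α : Type} (d : PySem.Dict String (List α)) (b : String) (x : α) :
    (if d.contains b then d else d.insert b []).modify b [] (fun l => l ++ [x])
      = d.modify b [] (fun l => l ++ [x]) := by
  by_cases h : d.contains b = true
  · simp [h]
  · simp only [Bool.not_eq_true] at h
    simp [h, PySem.Dict.modify, PySem.Dict.insert_insert_self,
      PySem.Dict.getD_insert_self, PySem.Dict.getD_of_not_contains d _ h]

-- insertBy's two defining equations, stated for rewriting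
theorem pv_insertBy_nil {α : Type} (before : α → α → Bool) (x : α) :
    PySem.List.insertBy before x [] = [x] := by
  simp [PySem.List.insertBy]

theorem pv_insertBy_cons {α : Type} (before : α → α → Bool) (x y : α) (ys : List α) :
    PySem.List.insertBy before x (y :: ys)
      = if before x y then x :: y :: ys else y :: PySem.List.insertBy before x ys := by
  simp [PySem.List.insertBy]

-- insertBy puts x in front when x goes before the head
theorem pv_insertBy_front {α : Type} (before : α → α → Bool) (x : α) (zs : List α)
    (h : ∀ z ∈ zs, before x z = true) :
    PySem.List.insertBy before x zs = x :: zs := by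
  cases zs with
  | nil => exact pv_insertBy_nil before x
  | cons z t => rw [pv_insertBy_cons, if_pos (h z (by simp))]

-- filter commutes with insertBy into a key-descending list
theorem pv_filter_insertBy {α : Type} (key : α → String) (p : α → Bool) (x : α) :
    ∀ s : List α, s.Pairwise (fun a b => key b ≤ key a) →
    (PySem.List.insertBy (fun a b => decide (key b < key a)) x s).filter p
      = if p x then PySem.List.insertBy (fun a b => decide (key b < key a)) x (s.filter p)
        else s.filter p := by
  intro s
  induction s with
  | nil =>
    intro _
    by_cases hx : p x = true <;> simp [pv_insertBy_nil, hx]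
  | cons y t ih =>
    intro hp
    rw [List.pairwise_cons] at hp
    obtain ⟨hy, ht⟩ := hp
    by_cases hxy : key y < key x
    · -- x goes in front of y
      have hbf : (decide (key y < key x)) = true := by simpa using hxy
      rw [pv_insertBy_cons, if_pos hbf]
      by_cases hx : p x = true
      · rw [if_pos hx, pv_insertBy_front _ x ((y :: t).filter p) ?front]
        · simp [List.filter_cons, hx]
        case front =>
          intro z hz
          have hzmem : z ∈ y :: t := List.mem_of_mem_filter hz
          have hle : key z ≤ key y := by
            rcases List.mem_cons.mp hzmem with heq | hzt
            · subst heq; exact le_refl _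
            · exact hy z hzt
          simpa using lt_of_le_of_lt hle hxy
      · simp only [Bool.not_eq_true] at hx
        simp [hx]
    · -- x goes after y
      have hbf : (decide (key y < key x)) = false := by simpa using hxy
      have hnbf : ¬ ((decide (key y < key x)) = true) := by
        intro hc; rw [hbf] at hc; simp at hc
      rw [pv_insertBy_cons, if_neg hnbf]
      simp only [List.filter_cons, ih ht]
      by_cases hx : p x = true <;> by_cases hyp : p y = true
      · rw [if_pos hx, if_pos hyp, if_pos hyp, if_pos hx, pv_insertBy_cons, if_neg hnbf]
      · simp only [Bool.not_eq_true] at hyp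
        simp [hyp, hx]
      · simp only [Bool.not_eq_true] at hx
        simp [hyp, hx]
      · simp only [Bool.not_eq_true] at hx hyp
        simp [hyp, hx]

-- a stable descending sort commutes with filtering
theorem pv_filter_sorted {α : Type} (key : α → String) (p : α → Bool) (xs : List α) :
    (PySem.List.sorted xs key true).filter p = PySem.List.sorted (xs.filter p) key true := by
  induction xs using List.reverseRecOn with
  | nil => simp [PySem.List.sorted]
  | append_singleton xs x ih =>
    rw [PySem.List.sorted_rev_eq_foldl_insertBy (xs ++ [x]), List.foldl_append,
      ← PySem.List.sorted_rev_eq_foldl_insertBy xs, List.foldl_cons, List.foldl_nil]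
    rw [pv_filter_insertBy key p x _ (PySem.List.sorted_pairwise_rev xs key), ih]
    rw [List.filter_append]
    by_cases hx : p x = true
    · rw [if_pos hx]
      rw [PySem.List.sorted_rev_eq_foldl_insertBy (xs.filter p ++ [x].filter p), List.filter_cons,
        if_pos hx, List.filter_nil, List.foldl_append,
        ← PySem.List.sorted_rev_eq_foldl_insertBy (xs.filter p), List.foldl_cons, List.foldl_nil]
    · simp only [Bool.not_eq_true] at hx
      simp [List.filter_cons, hx]

-- A's result, closed form: per-bucket filter of docs, sorted, capped, in first-appearance order
theorem pv_A_eq (docs : List (List (String × String))) (source_config : List (String × List (String × String))) (max_per_bucket : Int) :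
    apply_per_bucket_caps docs source_config max_per_bucket
      = (PySem.List.dedup (docs.map (fun d => pvBucketOf source_config d))).flatMap
          (fun b => PySem.List.slice
            (PySem.List.sorted (docs.filter (fun d => pvBucketOf source_config d == b)) pvPubKey true)
            none (some max_per_bucket)) := by
  unfold apply_per_bucket_caps
  have hstep : docs.foldl (fun bd doc =>
      let bucket := pvBucketOf source_config doc
      let bd := if bd.contains bucket then bd else bd.insert bucket []
      bd.modify bucket [] (fun l => l ++ [doc])) PySem.Dict.empty
    = docs.foldl (fun bd doc => bd.modify (pvBucketOf source_config doc) [] (fun l => l ++ [doc]))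
        PySem.Dict.empty := by
    apply PySem.List.foldl_congr_mem
    intro acc x _
    exact pv_mod_step acc (pvBucketOf source_config x) x
  rw [hstep]
  set f := fun d => pvBucketOf source_config d with hf
  set D := docs.foldl (fun bd doc => bd.modify (pvBucketOf source_config doc) [] (fun l => l ++ [doc]))
      PySem.Dict.empty with hD
  have hnodup : D.keys.Nodup := by
    rw [hD]
    exact PySem.Dict.nodup_keys_foldl_modify_key docs f [] (fun _ doc => (fun l => l ++ [doc])) _ (by simp)
  have hkeys : D.keys = PySem.List.dedup (docs.map f) := by
    rw [hD, PySem.Dict.keys_foldl_modify_key docs f [] (fun _ doc => (fun l => l ++ [doc]))]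
    rw [PySem.List.dedup_eq_ofList, PySem.Set.ofList_eq_foldl]
    rfl
  have hgetD : ∀ b, D.getD b [] = docs.filter (fun d => f d == b) := by
    intro b
    have : D = (docs.map (fun x => (f x, x))).foldl
        (fun d p => d.modify p.1 [] (fun l => l ++ [p.2])) PySem.Dict.empty := by
      rw [hD, List.foldl_map]
    rw [this, PySem.Dict.getD_foldl_modify_append]
    simp [List.filter_map, Function.comp_def]
  rw [PySem.List.foldl_append_eq_flatMap, List.nil_append,
    PySem.Dict.items_eq_map_keys D hnodup [], List.flatMap_map, hkeys]
  apply List.flatMap_congr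
  intro b _
  rw [hgetD b]

-- B's result in the same closed form (cap after filtering the global sort)
theorem pv_B_eq (docs : List (List (String × String))) (source_config : List (String × List (String × String))) (max_per_bucket : Int) :
    apply_per_bucket_caps_alt docs source_config max_per_bucket
      = (PySem.List.dedup (docs.map (fun d => pvBucketOf source_config d))).flatMap
          (fun b => PySem.List.slice
            ((PySem.List.sorted docs pvPubKey true).filter (fun d => pvBucketOf source_config d == b))
            none (some max_per_bucket)) := by
  unfold apply_per_bucket_caps_alt
  rw [PySem.List.foldl_append_eq_flatMap, List.nil_append]

-- ===== VERDICT (by name: the statement is the Claim_ definition above) =====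
theorem apply_per_bucket_caps_spec : Claim_equal_apply_per_bucket_caps := by
  intro docs source_config max_per_bucket _
  unfold Spec_apply_per_bucket_caps
  rw [pv_A_eq, pv_B_eq]
  apply List.flatMap_congr
  intro b _
  rw [pv_filter_sorted pvPubKey (fun d => pvBucketOf source_config d == b) docs]
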